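-- pv_equiv track=rewrite | github.com/jacobjoergens/CLT-Project | partition_algorithm.py | findCogridVertices
-- ===== SOURCE A (Python) =====
-- def findCogridVertices(concave, ind):
--     sorted_concave = sorted(concave, key=lambda coor: (coor[ind], coor[(ind+1)%2]))
--     mark = sorted_concave[0]
--     matched = False
--     colinear = []
--     for i in range(1,len(sorted_concave)):
--         if(mark[ind]==sorted_concave[i][ind]):
--             colinear.append([mark,sorted_concave[i]])
--         mark = sorted_concave[i]
--     return colinear
-- ===== SOURCE B (Python) =====
-- def findCogridVertices(concave, ind):
--     other = (ind + 1) % 2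
--     lines = sorted(set(c[ind] for c in concave))
--     colinear = []
--     for v in lines:
--         group = sorted((c for c in concave if c[ind] == v), key=lambda c: c[other])
--         colinear += [[a, b] for a, b in zip(group, group[1:])]
--     return colinear
-- ===== Notes on version B (the rewrite author's own statement) =====
-- stated objective: alternative
-- what changed: B replaces A's flat sort-by-tuple-key plus single adjacent-comparison scan with a gridline decomposition: it collects the distinct ind-coordinate values as a set, and for each value in sorted order filters and sorts that gridline's points by the other coordinate and zips each group with its tail to emit the consecutive pairs.
-- outside the precondition, e.g. on findCogridVertices([], 0): A raises IndexError, B returns []; on findCogridVertices([(1, 2)], 3): A raises IndexError, B raises IndexError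
import Mathlib
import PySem

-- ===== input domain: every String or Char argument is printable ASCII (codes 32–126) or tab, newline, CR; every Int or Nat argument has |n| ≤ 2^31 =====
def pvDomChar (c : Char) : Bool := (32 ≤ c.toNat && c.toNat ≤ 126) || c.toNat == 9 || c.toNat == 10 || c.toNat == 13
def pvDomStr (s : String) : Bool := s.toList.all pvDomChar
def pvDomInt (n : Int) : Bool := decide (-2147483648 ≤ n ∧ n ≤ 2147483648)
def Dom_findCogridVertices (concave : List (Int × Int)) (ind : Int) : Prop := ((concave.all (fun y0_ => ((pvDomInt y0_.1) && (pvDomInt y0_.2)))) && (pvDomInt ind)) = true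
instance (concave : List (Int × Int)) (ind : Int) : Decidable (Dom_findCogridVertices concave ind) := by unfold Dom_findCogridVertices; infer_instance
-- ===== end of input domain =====

-- B decomposes the work by gridline (set of distinct ind-coordinates, then a filter+sort+zip
-- per line) instead of A's flat tuple-key sort followed by one adjacent-comparison scan;
-- objective: alternative (not claimed faster). Return values only; neither program mutates input.

-- Python tuple indexing c[i] for a pair; exact for i ∈ {-2,-1,0,1} (Pre_ keeps ind there,
-- and (ind+1)%2 is always 0 or 1).
def tupGet (p : Int × Int) (i : Int) : Int := if i = 0 ∨ i = -2 then p.1 else p.2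

-- ===== PORT A =====
def findCogridVertices (concave : List (Int × Int)) (ind : Int) : List (List (Int × Int)) :=
  let srt := PySem.List.sorted2 concave (fun c => tupGet c ind)
      (fun c => tupGet c (PySem.Int.mod (ind + 1) 2))
  -- mark = sorted_concave[0]: IndexError on empty concave, excluded by Pre_
  let mark := PySem.List.pyGetD srt 0 (0, 0)
  let r := (PySem.List.pyRange 1 (PySem.List.len srt) 1).foldl
    (fun (st : (Int × Int) × List (List (Int × Int))) i =>
      let si := PySem.List.pyGetD srt i (0, 0)
      (si, if tupGet st.1 ind = tupGet si ind then st.2 ++ [[st.1, si]] else st.2))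
    (mark, [])
  r.2

-- ===== PORT B =====
def findCogridVertices_alt (concave : List (Int × Int)) (ind : Int) : List (List (Int × Int)) :=
  let other := PySem.Int.mod (ind + 1) 2
  let lines := PySem.List.sorted (PySem.Set.ofList (concave.map (fun c => tupGet c ind))) (fun v => v)
  lines.foldl (fun acc v =>
    let group := PySem.List.sorted (concave.filter (fun c => tupGet c ind == v)) (fun c => tupGet c other)
    acc ++ (group.zip group.tail).map (fun ab => [ab.1, ab.2])) []

-- ===== PRECONDITION & SPEC =====
-- Pre_ excludes empty concave (A raises IndexError at sorted_concave[0]) and any ind outside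
-- {-2,-1,0,1} (tuple indexing raises IndexError in both programs).
def Pre_findCogridVertices (concave : List (Int × Int)) (ind : Int) : Prop :=
  concave ≠ [] ∧ (ind = 0 ∨ ind = 1 ∨ ind = -1 ∨ ind = -2)
instance (concave : List (Int × Int)) (ind : Int) : Decidable (Pre_findCogridVertices concave ind) := by unfold Pre_findCogridVertices; infer_instance
def pvWitness_findCogridVertices : (List (Int × Int)) × Int := ([(0, 1), (0, 3), (2, 1)], 0)

def Spec_findCogridVertices (concave : List (Int × Int)) (ind : Int) (out : List (List (Int × Int))) : Prop := out = findCogridVertices_alt concave ind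
instance (concave : List (Int × Int)) (ind : Int) (out : List (List (Int × Int))) : Decidable (Spec_findCogridVertices concave ind out) := by unfold Spec_findCogridVertices; infer_instance

-- ===== CLAIM (what is proved, stated in full; the proofs are below) =====
def Claim_equal_findCogridVertices : Prop := ∀ (concave : List (Int × Int)) (ind : Int), Dom_findCogridVertices concave ind → Pre_findCogridVertices concave ind → Spec_findCogridVertices concave ind (findCogridVertices concave ind)
-- ===== LEMMAS AND PROOFS =====

-- A's scan, structurally: adjacent pairs with equal f-value.
def adjPairs (f : Int × Int → Int) : List (Int × Int) → List (List (Int × Int))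
  | a :: b :: t => (if f a = f b then [[a, b]] else []) ++ adjPairs f (b :: t)
  | _ => []

-- B's per-group zip, structurally: all adjacent pairs.
def allAdj : List (Int × Int) → List (List (Int × Int))
  | a :: b :: t => [a, b] :: allAdj (b :: t)
  | _ => []

lemma zip_tail_eq_allAdj (l : List (Int × Int)) :
    (l.zip l.tail).map (fun ab => [ab.1, ab.2]) = allAdj l := by
  match l with
  | [] => rfl
  | [a] => rfl
  | a :: b :: t =>
    simp only [List.tail_cons, List.zip_cons_cons, List.map_cons, allAdj]
    exact congrArg _ (zip_tail_eq_allAdj (b :: t))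

lemma foldl_adjPairs (f : Int × Int → Int) :
    ∀ (t : List (Int × Int)) (m : Int × Int) (acc : List (List (Int × Int))),
    (t.foldl (fun (st : (Int × Int) × List (List (Int × Int))) si =>
        (si, if f st.1 = f si then st.2 ++ [[st.1, si]] else st.2)) (m, acc)).2
      = acc ++ adjPairs f (m :: t) := by
  intro t
  induction t with
  | nil => intro m acc; simp [adjPairs]
  | cons b t ih =>
    intro m acc
    simp only [List.foldl_cons, ih, adjPairs]
    split_ifs <;> simp

lemma sorted2_eq_sorted_lex (xs : List (Int × Int)) (k1 k2 : Int × Int → Int) :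
    PySem.List.sorted2 xs k1 k2 = PySem.List.sorted xs (fun c => toLex (k1 c, k2 c)) := by
  show xs.foldl _ [] = xs.foldl _ []
  congr 1
  funext acc x
  congr 1
  funext a b
  have : (toLex (k1 a, k2 a) < toLex (k1 b, k2 b)) ↔
      (k1 a < k1 b ∨ (k1 a = k1 b ∧ k2 a < k2 b)) := Prod.Lex.toLex_lt_toLex
  by_cases h1 : k1 a < k1 b <;> by_cases h2 : k1 b < k1 a <;> by_cases h3 : k2 a < k2 b <;>
    simp [this, h1, h2, h3] <;> omega

-- partition: concatenating the filters over a complete duplicate-free key list is a permutation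
lemma flatMap_filter_perm (f : Int × Int → Int) :
    ∀ (vs : List Int) (xs : List (Int × Int)), vs.Nodup → (∀ x ∈ xs, f x ∈ vs) →
    (vs.flatMap (fun v => xs.filter (fun x => f x == v))).Perm xs := by
  intro vs
  induction vs with
  | nil =>
    intro xs _ h
    have : xs = [] := List.eq_nil_iff_forall_not_mem.2 (fun x hx => by simpa using h x hx)
    simp [this]
  | cons v vs ih =>
    intro xs hnd h
    have hvs : v ∉ vs := (List.nodup_cons.1 hnd).1
    have hstep : ∀ v' ∈ vs, xs.filter (fun x => f x == v')
        = (xs.filter (fun x => !(f x == v))).filter (fun x => f x == v') := by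
      intro v' hv'
      rw [List.filter_filter]
      apply List.filter_congr
      intro x _
      have hne : v' ≠ v := fun he => hvs (he ▸ hv')
      by_cases hx : f x = v' <;> simp [hx, hne]
    have hcong : vs.flatMap (fun v' => xs.filter (fun x => f x == v'))
        = vs.flatMap (fun v' => (xs.filter (fun x => !(f x == v))).filter (fun x => f x == v')) := by
      apply List.flatMap_congr
      intro v' hv'
      exact hstep v' hv'
    have hihyp : ∀ y ∈ xs.filter (fun x => !(f x == v)), f y ∈ vs := by
      intro y hy
      rcases List.mem_filter.1 hy with ⟨hy1, hy2⟩
      have := h y hy1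
      simp only [List.mem_cons] at this
      rcases this with h' | h'
      · simp [h'] at hy2
      · exact h'
    have hpm := ih (xs.filter (fun x => !(f x == v))) (List.nodup_cons.1 hnd).2 hihyp
    have h3 : (xs.filter (fun x => f x == v)
        ++ vs.flatMap (fun v' => xs.filter (fun x => f x == v'))).Perm xs := by
      rw [hcong]
      exact (hpm.append_left _).trans (List.filter_append_perm _ xs)
    simpa [List.flatMap_cons] using h3

-- adjPairs over a chunk of constant f-value followed by a rest starting at a different value
lemma adjPairs_append (f : Int × Int → Int) (v : Int) :
    ∀ (c r : List (Int × Int)), (∀ p ∈ c, f p = v) → (∀ q ∈ r.head?, f q ≠ v) →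
    adjPairs f (c ++ r) = allAdj c ++ adjPairs f r := by
  intro c
  induction c with
  | nil => intro r _ _; simp [allAdj]
  | cons a c ih =>
    intro r hc hr
    match c with
    | [] =>
      match r with
      | [] => simp [adjPairs, allAdj]
      | b :: t =>
        have hb : f b ≠ v := hr b rfl
        have ha : f a = v := hc a (by simp)
        simp [adjPairs, allAdj, ha, Ne.symm hb]
    | a' :: c' =>
      have ha : f a = v := hc a (by simp)
      have ha' : f a' = v := hc a' (by simp)
      have := ih r (fun p hp => hc p (List.mem_cons_of_mem a hp)) hr
      simp only [List.cons_append] at this ⊢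
      simp [adjPairs, allAdj, ha, ha', this]

lemma adjPairs_flatMap (f : Int × Int → Int) (G : Int → List (Int × Int)) :
    ∀ (vs : List Int), vs.Nodup → (∀ v ∈ vs, ∀ p ∈ G v, f p = v) →
    adjPairs f (vs.flatMap G) = vs.flatMap (fun v => allAdj (G v)) := by
  intro vs
  induction vs with
  | nil => intro _ _; simp [adjPairs]
  | cons v vs ih =>
    intro hnd hG
    have hvs : v ∉ vs := (List.nodup_cons.1 hnd).1
    have hrest : ∀ q ∈ (vs.flatMap G).head?, f q ≠ v := by
      intro q hq
      have hmem : q ∈ vs.flatMap G := by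
        cases h : vs.flatMap G with
        | nil => simp [h] at hq
        | cons x t => simp [h] at hq; simp [hq]
      rcases List.mem_flatMap.1 hmem with ⟨v', hv', hqv'⟩
      have : f q = v' := hG v' (List.mem_cons_of_mem v hv') q hqv'
      rw [this]
      exact fun he => hvs (he ▸ hv')
    simp only [List.flatMap_cons]
    rw [adjPairs_append f v (G v) (vs.flatMap G) (hG v (by simp)) hrest,
      ih (List.nodup_cons.1 hnd).2 (fun v' hv' => hG v' (List.mem_cons_of_mem v hv'))]

-- the key fact: the flat (f,g)-lex sort is the concatenation, over the distinct f-values in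
-- increasing order, of the g-sorted groups
lemma sorted_lex_eq_flatMap (f g : Int × Int → Int)
    (hinj : ∀ a b : Int × Int, f a = f b → g a = g b → a = b) (xs : List (Int × Int)) :
    PySem.List.sorted xs (fun c => toLex (f c, g c))
      = (PySem.List.sorted (PySem.Set.ofList (xs.map f)) (fun v => v)).flatMap
          (fun v => PySem.List.sorted (xs.filter (fun c => f c == v)) g) := by
  set lines := PySem.List.sorted (PySem.Set.ofList (xs.map f)) (fun v => v) with hlines
  set G := fun v => PySem.List.sorted (xs.filter (fun c => f c == v)) g with hGdef
  have hlnd : lines.Nodup :=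
    ((PySem.List.sorted_perm _ _ _).nodup_iff).2 (PySem.Set.nodup_ofList _)
  have hlt : lines.Pairwise (· < ·) := PySem.List.sorted_ofList_pairwise_lt _
  have hGmem : ∀ v, ∀ p ∈ G v, f p = v := by
    intro v p hp
    have : p ∈ xs.filter (fun c => f c == v) := (PySem.List.mem_sorted _ _ _ _).1 hp
    simpa using (List.mem_filter.1 this).2
  have hperm : (lines.flatMap G).Perm xs := by
    have h1 : (lines.flatMap G).Perm (lines.flatMap (fun v => xs.filter (fun c => f c == v))) := by
      exact List.Perm.flatMap_left lines (fun v _ => PySem.List.sorted_perm _ _ _)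
    have h2 : (lines.flatMap (fun v => xs.filter (fun c => f c == v))).Perm xs := by
      apply flatMap_filter_perm f lines xs hlnd
      intro x hx
      rw [hlines, PySem.List.mem_sorted]
      exact (PySem.Set.mem_ofList _ _).2 (List.mem_map_of_mem hx)
    exact h1.trans h2
  apply PySem.List.eq_of_perm_of_pairwise_le_of_injective (fun c => toLex (f c, g c))
  · intro a b hab
    have h1 : f a = f b := congrArg (fun p => (ofLex p).1) hab
    have h2 : g a = g b := congrArg (fun p => (ofLex p).2) hab
    exact hinj a b h1 h2
  · exact (PySem.List.sorted_perm _ _ _).trans hperm.symm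
  · exact PySem.List.sorted_pairwise _ _
  · rw [List.flatMap, List.pairwise_flatten]
    constructor
    · intro l hl
      rcases List.mem_map.1 hl with ⟨v, _, rfl⟩
      have hg : (G v).Pairwise (fun a b => g a ≤ g b) := PySem.List.sorted_pairwise _ _
      apply hg.imp_of_mem
      intro a b ha hb hgab
      have hfa := hGmem v a ha
      have hfb := hGmem v b hb
      rw [Prod.Lex.toLex_le_toLex]
      right
      exact ⟨hfa.trans hfb.symm, hgab⟩
    · have := hlt
      rw [List.pairwise_map]
      apply this.imp_of_mem
      intro v v' _ _ hvv' a ha b hb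
      rw [Prod.Lex.toLex_le_toLex]
      left
      rw [hGmem v a ha, hGmem v' b hb]
      exact hvv'

-- A's index loop over the sorted list, in structural form
lemma loopA (ind : Int) (s : List (Int × Int)) :
    (List.foldl (fun (st : (Int × Int) × List (List (Int × Int))) i =>
        (PySem.List.pyGetD s i ((0 : Int), (0 : Int)),
         if tupGet st.1 ind = tupGet (PySem.List.pyGetD s i ((0 : Int), (0 : Int))) ind
         then st.2 ++ [[st.1, PySem.List.pyGetD s i ((0 : Int), (0 : Int))]] else st.2))
      (PySem.List.pyGetD s 0 ((0 : Int), (0 : Int)), []) (PySem.List.pyRange 1 (PySem.List.len s) 1)).2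
      = adjPairs (fun c => tupGet c ind) s := by
  have h := PySem.List.foldl_pyRange_pyGetD s ((0 : Int), (0 : Int))
      (fun (st : (Int × Int) × List (List (Int × Int))) si =>
        (si, if tupGet st.1 ind = tupGet si ind then st.2 ++ [[st.1, si]] else st.2))
      (PySem.List.pyGetD s 0 ((0 : Int), (0 : Int)), []) (a := 1) (by norm_num)
  beta_reduce at h
  rw [h]
  clear h
  cases s with
  | nil => simp [adjPairs]
  | cons m t =>
    simp only [Int.toNat_one, List.drop_succ_cons, List.drop_zero]
    have hget : PySem.List.pyGetD (m :: t) (0 : Int) ((0 : Int), (0 : Int)) = m := by simp [pysem]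
    rw [hget]
    simpa using foldl_adjPairs (fun c => tupGet c ind) t m []

-- A's whole computation, in structural form
lemma portA_eq_adjPairs (concave : List (Int × Int)) (ind : Int) :
    findCogridVertices concave ind
      = adjPairs (fun c => tupGet c ind)
          (PySem.List.sorted2 concave (fun c => tupGet c ind)
            (fun c => tupGet c (PySem.Int.mod (ind + 1) 2))) := by
  unfold findCogridVertices
  exact loopA ind _

-- B's whole computation, in structural form
lemma portB_eq_flatMap (concave : List (Int × Int)) (ind : Int) :
    findCogridVertices_alt concave ind
      = (PySem.List.sorted (PySem.Set.ofList (concave.map (fun c => tupGet c ind))) (fun v => v)).flatMap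
          (fun v => allAdj (PySem.List.sorted (concave.filter (fun c => tupGet c ind == v))
            (fun c => tupGet c (PySem.Int.mod (ind + 1) 2)))) := by
  unfold findCogridVertices_alt
  simp only []
  rw [PySem.List.foldl_append_eq_flatMap]
  simp only [List.nil_append]
  apply List.flatMap_congr
  intro v _
  exact zip_tail_eq_allAdj _

-- the two ports agree for a fixed pair of coordinate projections
lemma agree (f g : Int × Int → Int)
    (hinj : ∀ a b : Int × Int, f a = f b → g a = g b → a = b) (xs : List (Int × Int)) :
    adjPairs f (PySem.List.sorted xs (fun c => toLex (f c, g c)))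
      = (PySem.List.sorted (PySem.Set.ofList (xs.map f)) (fun v => v)).flatMap
          (fun v => allAdj (PySem.List.sorted (xs.filter (fun c => f c == v)) g)) := by
  rw [sorted_lex_eq_flatMap f g hinj xs]
  apply adjPairs_flatMap
  · exact ((PySem.List.sorted_perm _ _ _).nodup_iff).2 (PySem.Set.nodup_ofList _)
  · intro v _ p hp
    have : p ∈ xs.filter (fun c => f c == v) := (PySem.List.mem_sorted _ _ _ _).1 hp
    simpa using (List.mem_filter.1 this).2

-- ===== VERDICT (by name: the statement is the Claim_ definition above) =====
theorem findCogridVertices_spec : Claim_equal_findCogridVertices := by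
  intro concave ind _ hpre
  rcases hpre with ⟨-, hind⟩
  unfold Spec_findCogridVertices
  rw [portA_eq_adjPairs concave ind, portB_eq_flatMap concave ind, sorted2_eq_sorted_lex]
  rcases hind with h | h | h | h <;> subst h
  · exact agree _ _ (fun a b h1 h2 => by
      simp only [tupGet] at h1 h2; norm_num at h1 h2; exact Prod.ext h1 h2) concave
  · exact agree _ _ (fun a b h1 h2 => by
      simp only [tupGet] at h1 h2; norm_num at h1 h2; exact Prod.ext h2 h1) concave
  · exact agree _ _ (fun a b h1 h2 => by
      simp only [tupGet] at h1 h2; norm_num at h1 h2; exact Prod.ext h2 h1) concave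
  · exact agree _ _ (fun a b h1 h2 => by
      simp only [tupGet] at h1 h2; norm_num at h1 h2; exact Prod.ext h1 h2) concave
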